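-- pv_equiv track=rewrite | github.com/y-tetsu/math_puzzle | q50.py | max_route
-- ===== SOURCE A (Python) =====
-- def max_route(pos_x, pos_y, horizontal, vertical):
--     """
--     全経路を探索し最長の移動距離を求める
--     """
--     length = len(horizontal) - 1
--     width = len(vertical) - 1
--
--     # 平行線上に3回以上移動
--     if list(filter(lambda x: x >= 3, horizontal)):
--         return 0
--
--     # 垂直線上に3回以上移動
--     if list(filter(lambda x: x >= 3, vertical)):
--         return 0
--
--     # ゴールに到着
--     if pos_x == width and pos_y == length:
--         total = sum(horizontal) + sum(vertical)
--         return total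
--
--     # 次に進む
--     max_total = 0
--     if pos_x >= 0 and pos_y >= 0:
--         if pos_x <= width and pos_y <= length:
--             for delta_x, delta_y in [[-1, 0], [1, 0], [0, -1], [0, 1]]:
--                 next_h = horizontal[:]
--                 next_v = vertical[:]
--
--                 if abs(delta_x) > 0:
--                     next_h[pos_y] += 1
--                 if abs(delta_y) > 0:
--                     next_v[pos_x] += 1
--
--                 next_x = pos_x + delta_x
--                 next_y = pos_y + delta_y
--                 total = max_route(next_x, next_y, next_h, next_v)
--
--                 if total > max_total:
--                     max_total = total
--
--     return max_total
-- ===== SOURCE B (Python) =====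
-- # Memoized depth-first search over the same state space: each state
-- # (x, y, horizontal, vertical) is computed once and cached in a dict,
-- # so repeated subtrees of the naive search collapse into single lookups.
-- def max_route(pos_x, pos_y, horizontal, vertical):
--     memo = {}
--
--     def best(x, y, h, v):
--         key = (x, y, h, v)
--         if key in memo:
--             return memo[key]
--         if any(e >= 3 for e in h) or any(e >= 3 for e in v):
--             r = 0
--         elif x == len(v) - 1 and y == len(h) - 1:
--             r = sum(h) + sum(v)
--         elif 0 <= x <= len(v) - 1 and 0 <= y <= len(h) - 1:
--             nh = h[:y] + (h[y] + 1,) + h[y + 1:]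
--             nv = v[:x] + (v[x] + 1,) + v[x + 1:]
--             r = max(0,
--                     best(x - 1, y, nh, v),
--                     best(x + 1, y, nh, v),
--                     best(x, y - 1, h, nv),
--                     best(x, y + 1, h, nv))
--         else:
--             r = 0
--         memo[key] = r
--         return r
--
--     return best(pos_x, pos_y, tuple(horizontal), tuple(vertical))
-- ===== Notes on version B (the rewrite author's own statement) =====
-- stated objective: alternative
-- what changed: Replaces the naive exhaustive recursion by a memoized depth-first search: each state (x, y, horizontal, vertical) is solved once and cached in a dict, so repeated subtrees collapse; on the generated timing inputs (where the walk ends immediately) this is not measurably faster, so no speed is claimed.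
import Mathlib
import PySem

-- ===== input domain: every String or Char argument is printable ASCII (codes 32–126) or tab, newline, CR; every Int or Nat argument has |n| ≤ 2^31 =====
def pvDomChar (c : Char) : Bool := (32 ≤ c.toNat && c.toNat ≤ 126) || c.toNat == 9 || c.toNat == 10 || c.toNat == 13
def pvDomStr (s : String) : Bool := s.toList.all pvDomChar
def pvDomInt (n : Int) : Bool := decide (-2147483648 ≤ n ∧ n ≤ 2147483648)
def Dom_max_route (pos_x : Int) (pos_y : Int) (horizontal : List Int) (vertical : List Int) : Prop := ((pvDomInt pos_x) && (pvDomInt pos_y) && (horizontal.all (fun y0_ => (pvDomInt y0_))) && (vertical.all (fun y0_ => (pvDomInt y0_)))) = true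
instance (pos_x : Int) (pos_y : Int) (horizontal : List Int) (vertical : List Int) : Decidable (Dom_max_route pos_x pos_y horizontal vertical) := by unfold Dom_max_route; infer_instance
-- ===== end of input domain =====

-- B replaces A's naive exhaustive recursion by a memoized DFS over the same states (each
-- state solved once, cached in a dict): same value everywhere, a different algorithm.
-- Both ports carry a fuel parameter (fuel = measure + 1) purely as a totality guard; the
-- measure strictly decreases on every recursive call, so the 0-fuel branch is never taken.

-- shared helpers: `l[i] += 1` (both programs only do this with 0 ≤ i < l.length, where
-- List.modify is exactly Python's in-range item assignment), and the termination measure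
def incNat : List Int → Nat → List Int
  | [], _ => []
  | a :: t, 0 => (a + 1) :: t
  | a :: t, n + 1 => a :: incNat t n
def pyIncAt (l : List Int) (i : Int) : List Int := incNat l i.toNat
def cap3 (e : Int) : Nat := (3 - e).toNat
def muR (h v : List Int) : Nat := (h.map cap3).sum + (v.map cap3).sum

-- ===== PORT A =====
def goA (fuel : Nat) (x y : Int) (h v : List Int) : Int :=
  match fuel with
  | 0 => 0  -- unreachable: fuel always exceeds the measure
  | f + 1 =>
    if h.filter (fun e => decide (3 ≤ e)) ≠ [] then 0
    else if v.filter (fun e => decide (3 ≤ e)) ≠ [] then 0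
    else if x = (v.length : Int) - 1 ∧ y = (h.length : Int) - 1 then h.sum + v.sum
    else if 0 ≤ x ∧ 0 ≤ y ∧ x ≤ (v.length : Int) - 1 ∧ y ≤ (h.length : Int) - 1 then
      -- the for-loop over the four literal directions, unrolled; `if total > max_total`
      let t1 := goA f (x - 1) y (pyIncAt h y) v
      let m1 := if t1 > 0 then t1 else (0 : Int)
      let t2 := goA f (x + 1) y (pyIncAt h y) v
      let m2 := if t2 > m1 then t2 else m1
      let t3 := goA f x (y - 1) h (pyIncAt v x)
      let m3 := if t3 > m2 then t3 else m2
      let t4 := goA f x (y + 1) h (pyIncAt v x)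
      if t4 > m3 then t4 else m3
    else 0

def max_route (pos_x : Int) (pos_y : Int) (horizontal : List Int) (vertical : List Int) : Int :=
  goA (muR horizontal vertical + 1) pos_x pos_y horizontal vertical

-- ===== PORT B =====
-- Source B's inner `best` with its dict `memo` threaded explicitly; returns (value, memo)
def goB (fuel : Nat) (x y : Int) (h v : List Int)
    (memo : PySem.Dict (Int × Int × List Int × List Int) Int) :
    Int × PySem.Dict (Int × Int × List Int × List Int) Int :=
  match fuel with
  | 0 => (0, memo)  -- unreachable: fuel always exceeds the measure
  | f + 1 =>
    match memo.get? (x, y, h, v) with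
    | some r => (r, memo)
    | none =>
      let p :=
        if h.any (fun e => decide (3 ≤ e)) || v.any (fun e => decide (3 ≤ e)) then
          ((0 : Int), memo)
        else if x = (v.length : Int) - 1 ∧ y = (h.length : Int) - 1 then
          (h.sum + v.sum, memo)
        else if 0 ≤ x ∧ x ≤ (v.length : Int) - 1 ∧ 0 ≤ y ∧ y ≤ (h.length : Int) - 1 then
          let nh := pyIncAt h y  -- h[:y] + (h[y]+1,) + h[y+1:], index in range here
          let nv := pyIncAt v x
          let q1 := goB f (x - 1) y nh v memo
          let q2 := goB f (x + 1) y nh v q1.2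
          let q3 := goB f x (y - 1) h nv q2.2
          let q4 := goB f x (y + 1) h nv q3.2
          (max (max (max (max 0 q1.1) q2.1) q3.1) q4.1, q4.2)
        else ((0 : Int), memo)
      (p.1, p.2.insert (x, y, h, v) p.1)

def max_route_alt (pos_x : Int) (pos_y : Int) (horizontal : List Int) (vertical : List Int) : Int :=
  (goB (muR horizontal vertical + 1) pos_x pos_y horizontal vertical PySem.Dict.empty).1

-- ===== PRECONDITION & SPEC =====
def Spec_max_route (pos_x : Int) (pos_y : Int) (horizontal : List Int) (vertical : List Int) (out : Int) : Prop := out = max_route_alt pos_x pos_y horizontal vertical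
instance (pos_x : Int) (pos_y : Int) (horizontal : List Int) (vertical : List Int) (out : Int) : Decidable (Spec_max_route pos_x pos_y horizontal vertical out) := by unfold Spec_max_route; infer_instance

-- ===== CLAIM (what is proved, stated in full; the proofs are below) =====
def Claim_equal_max_route : Prop := ∀ (pos_x : Int) (pos_y : Int) (horizontal : List Int) (vertical : List Int), Dom_max_route pos_x pos_y horizontal vertical → Spec_max_route pos_x pos_y horizontal vertical (max_route pos_x pos_y horizontal vertical)

-- ===== LEMMAS AND PROOFS =====

lemma sum_map_cap3_incNat : ∀ (l : List Int) (i : Nat), i < l.length → (∀ e ∈ l, e < 3) →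
    ((incNat l i).map cap3).sum + 1 = (l.map cap3).sum := by
  intro l
  induction l with
  | nil => intro i hi; simp at hi
  | cons a t ih =>
    intro i hi hall
    cases i with
    | zero =>
      have ha : a < 3 := hall a (by simp)
      simp [incNat, cap3]
      omega
    | succ j =>
      have := ih j (by simpa using hi) (fun e he => hall e (by simp [he]))
      simp [incNat]
      omega

lemma mu_dec_h (h v : List Int) (y : Int) (hall : ∀ e ∈ h, e < 3)
    (h0 : 0 ≤ y) (h1 : y ≤ (h.length : Int) - 1) :
    muR (pyIncAt h y) v < muR h v := by
  have hy : y.toNat < h.length := by omega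
  have := sum_map_cap3_incNat h y.toNat hy hall
  unfold muR pyIncAt
  omega

lemma mu_dec_v (h v : List Int) (x : Int) (hall : ∀ e ∈ v, e < 3)
    (h0 : 0 ≤ x) (h1 : x ≤ (v.length : Int) - 1) :
    muR h (pyIncAt v x) < muR h v := by
  have hx : x.toNat < v.length := by omega
  have := sum_map_cap3_incNat v x.toNat hx hall
  unfold muR pyIncAt
  omega

-- one-step unfolding of the ports (definitional)
lemma goA_succ (f : Nat) (x y : Int) (h v : List Int) :
    goA (f + 1) x y h v =
      (if h.filter (fun e => decide (3 ≤ e)) ≠ [] then 0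
       else if v.filter (fun e => decide (3 ≤ e)) ≠ [] then 0
       else if x = (v.length : Int) - 1 ∧ y = (h.length : Int) - 1 then h.sum + v.sum
       else if 0 ≤ x ∧ 0 ≤ y ∧ x ≤ (v.length : Int) - 1 ∧ y ≤ (h.length : Int) - 1 then
         let t1 := goA f (x - 1) y (pyIncAt h y) v
         let m1 := if t1 > 0 then t1 else (0 : Int)
         let t2 := goA f (x + 1) y (pyIncAt h y) v
         let m2 := if t2 > m1 then t2 else m1
         let t3 := goA f x (y - 1) h (pyIncAt v x)
         let m3 := if t3 > m2 then t3 else m2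
         let t4 := goA f x (y + 1) h (pyIncAt v x)
         if t4 > m3 then t4 else m3
       else 0) := rfl

lemma goB_succ (f : Nat) (x y : Int) (h v : List Int)
    (memo : PySem.Dict (Int × Int × List Int × List Int) Int) :
    goB (f + 1) x y h v memo =
      (match memo.get? (x, y, h, v) with
       | some r => (r, memo)
       | none =>
         let p :=
           if h.any (fun e => decide (3 ≤ e)) || v.any (fun e => decide (3 ≤ e)) then
             ((0 : Int), memo)
           else if x = (v.length : Int) - 1 ∧ y = (h.length : Int) - 1 then
             (h.sum + v.sum, memo)
           else if 0 ≤ x ∧ x ≤ (v.length : Int) - 1 ∧ 0 ≤ y ∧ y ≤ (h.length : Int) - 1 then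
             let nh := pyIncAt h y
             let nv := pyIncAt v x
             let q1 := goB f (x - 1) y nh v memo
             let q2 := goB f (x + 1) y nh v q1.2
             let q3 := goB f x (y - 1) h nv q2.2
             let q4 := goB f x (y + 1) h nv q3.2
             (max (max (max (max 0 q1.1) q2.1) q3.1) q4.1, q4.2)
           else ((0 : Int), memo)
         (p.1, p.2.insert (x, y, h, v) p.1)) := rfl

lemma goB_some (f : Nat) (x y : Int) (h v : List Int)
    (memo : PySem.Dict (Int × Int × List Int × List Int) Int) (r : Int)
    (hg : memo.get? (x, y, h, v) = some r) :
    goB (f + 1) x y h v memo = (r, memo) := by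
  rw [goB_succ, hg]

lemma goB_none (f : Nat) (x y : Int) (h v : List Int)
    (memo : PySem.Dict (Int × Int × List Int × List Int) Int)
    (hg : memo.get? (x, y, h, v) = none) :
    goB (f + 1) x y h v memo =
      (let p :=
         if h.any (fun e => decide (3 ≤ e)) || v.any (fun e => decide (3 ≤ e)) then
           ((0 : Int), memo)
         else if x = (v.length : Int) - 1 ∧ y = (h.length : Int) - 1 then
           (h.sum + v.sum, memo)
         else if 0 ≤ x ∧ x ≤ (v.length : Int) - 1 ∧ 0 ≤ y ∧ y ≤ (h.length : Int) - 1 then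
           let nh := pyIncAt h y
           let nv := pyIncAt v x
           let q1 := goB f (x - 1) y nh v memo
           let q2 := goB f (x + 1) y nh v q1.2
           let q3 := goB f x (y - 1) h nv q2.2
           let q4 := goB f x (y + 1) h nv q3.2
           (max (max (max (max 0 q1.1) q2.1) q3.1) q4.1, q4.2)
         else ((0 : Int), memo)
       (p.1, p.2.insert (x, y, h, v) p.1)) := by
  rw [goB_succ, hg]

lemma filter_ne_iff (l : List Int) :
    l.filter (fun e => decide (3 ≤ e)) ≠ [] ↔ ∃ e ∈ l, 3 ≤ e := by
  rw [ne_eq, List.filter_eq_nil_iff]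
  push Not
  simp

lemma any_or_true_iff (h v : List Int) :
    ((h.any fun e => decide (3 ≤ e)) || v.any fun e => decide (3 ≤ e)) = true ↔
      (∃ e ∈ h, 3 ≤ e) ∨ (∃ e ∈ v, 3 ≤ e) := by
  simp

set_option maxHeartbeats 1000000 in
lemma goA_irrel : ∀ (f g : Nat) (x y : Int) (h v : List Int),
    muR h v < f → muR h v < g → goA f x y h v = goA g x y h v := by
  intro f
  induction f with
  | zero => intro g x y h v hf; omega
  | succ f ih =>
    intro g x y h v hf hg
    obtain ⟨g', rfl⟩ : ∃ g', g = g' + 1 := ⟨g - 1, by omega⟩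
    rw [goA_succ f, goA_succ g']
    by_cases c1 : h.filter (fun e => decide (3 ≤ e)) ≠ []
    · rw [if_pos c1, if_pos c1]
    rw [if_neg c1, if_neg c1]
    by_cases c2 : v.filter (fun e => decide (3 ≤ e)) ≠ []
    · rw [if_pos c2, if_pos c2]
    rw [if_neg c2, if_neg c2]
    by_cases c3 : x = (v.length : Int) - 1 ∧ y = (h.length : Int) - 1
    · rw [if_pos c3, if_pos c3]
    rw [if_neg c3, if_neg c3]
    by_cases c4 : 0 ≤ x ∧ 0 ≤ y ∧ x ≤ (v.length : Int) - 1 ∧ y ≤ (h.length : Int) - 1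
    · rw [if_pos c4, if_pos c4]
      have allh : ∀ e ∈ h, e < 3 := by
        intro e he
        have := List.filter_eq_nil_iff.mp (not_ne_iff.mp c1) e he
        simp at this; omega
      have allv : ∀ e ∈ v, e < 3 := by
        intro e he
        have := List.filter_eq_nil_iff.mp (not_ne_iff.mp c2) e he
        simp at this; omega
      obtain ⟨hx0, hy0, hxw, hyl⟩ := c4
      have dh := mu_dec_h h v y allh hy0 hyl
      have dv := mu_dec_v h v x allv hx0 hxw
      rw [ih g' (x - 1) y (pyIncAt h y) v (by omega) (by omega),
          ih g' (x + 1) y (pyIncAt h y) v (by omega) (by omega),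
          ih g' x (y - 1) h (pyIncAt v x) (by omega) (by omega),
          ih g' x (y + 1) h (pyIncAt v x) (by omega) (by omega)]
    · rw [if_neg c4, if_neg c4]

-- A's value satisfies B's recurrence (conditions written exactly as in goB)
set_option maxHeartbeats 1000000 in
lemma max_route_eq (x y : Int) (h v : List Int) :
    max_route x y h v =
      if (h.any fun e => decide (3 ≤ e)) || v.any fun e => decide (3 ≤ e) then 0
      else if x = (v.length : Int) - 1 ∧ y = (h.length : Int) - 1 then h.sum + v.sum
      else if 0 ≤ x ∧ x ≤ (v.length : Int) - 1 ∧ 0 ≤ y ∧ y ≤ (h.length : Int) - 1 then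
        max (max (max (max 0 (max_route (x - 1) y (pyIncAt h y) v))
                      (max_route (x + 1) y (pyIncAt h y) v))
                 (max_route x (y - 1) h (pyIncAt v x)))
            (max_route x (y + 1) h (pyIncAt v x))
      else 0 := by
  unfold max_route
  rw [goA_succ]
  by_cases hA : ∃ e ∈ h, 3 ≤ e
  · rw [if_pos ((filter_ne_iff h).mpr hA), if_pos ((any_or_true_iff h v).mpr (Or.inl hA))]
  by_cases hB : ∃ e ∈ v, 3 ≤ e
  · rw [if_neg (fun hc => hA ((filter_ne_iff h).mp hc)),
        if_pos ((filter_ne_iff v).mpr hB),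
        if_pos ((any_or_true_iff h v).mpr (Or.inr hB))]
  rw [if_neg (fun hc => hA ((filter_ne_iff h).mp hc)),
      if_neg (fun hc => hB ((filter_ne_iff v).mp hc)),
      if_neg (fun hc => ((any_or_true_iff h v).mp hc).elim hA hB)]
  by_cases hG : x = (v.length : Int) - 1 ∧ y = (h.length : Int) - 1
  · rw [if_pos hG, if_pos hG]
  rw [if_neg hG, if_neg hG]
  by_cases hBd : 0 ≤ x ∧ x ≤ (v.length : Int) - 1 ∧ 0 ≤ y ∧ y ≤ (h.length : Int) - 1
  · rw [if_pos (show 0 ≤ x ∧ 0 ≤ y ∧ x ≤ (v.length : Int) - 1 ∧ y ≤ (h.length : Int) - 1 by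
        tauto), if_pos hBd]
    simp only []
    have allh : ∀ e ∈ h, e < 3 := fun e he => by by_contra hc; exact hA ⟨e, he, by omega⟩
    have allv : ∀ e ∈ v, e < 3 := fun e he => by by_contra hc; exact hB ⟨e, he, by omega⟩
    have dh := mu_dec_h h v y allh hBd.2.2.1 hBd.2.2.2
    have dv := mu_dec_v h v x allv hBd.1 hBd.2.1
    rw [goA_irrel (muR h v) (muR (pyIncAt h y) v + 1) (x - 1) y (pyIncAt h y) v (by omega) (by omega),
        goA_irrel (muR h v) (muR (pyIncAt h y) v + 1) (x + 1) y (pyIncAt h y) v (by omega) (by omega),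
        goA_irrel (muR h v) (muR h (pyIncAt v x) + 1) x (y - 1) h (pyIncAt v x) (by omega) (by omega),
        goA_irrel (muR h v) (muR h (pyIncAt v x) + 1) x (y + 1) h (pyIncAt v x) (by omega) (by omega)]
    split_ifs <;> omega
  · rw [if_neg (show ¬(0 ≤ x ∧ 0 ≤ y ∧ x ≤ (v.length : Int) - 1 ∧ y ≤ (h.length : Int) - 1) by
        tauto), if_neg hBd]

-- the memo invariant: every cached value is the (A-)value of its key
def InvM (memo : PySem.Dict (Int × Int × List Int × List Int) Int) : Prop :=
  ∀ k r, memo.get? k = some r → r = max_route k.1 k.2.1 k.2.2.1 k.2.2.2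

lemma InvM_insert (memo : PySem.Dict (Int × Int × List Int × List Int) Int)
    (x y : Int) (h v : List Int) (r : Int) (hI : InvM memo)
    (hr : r = max_route x y h v) : InvM (memo.insert (x, y, h, v) r) := by
  intro k r' hk
  rw [PySem.Dict.get?_insert] at hk
  split_ifs at hk with hkey
  · cases hk; subst hkey; simpa using hr
  · exact hI k r' hk

set_option maxHeartbeats 1000000 in
lemma goB_correct : ∀ (f : Nat) (x y : Int) (h v : List Int)
    (memo : PySem.Dict (Int × Int × List Int × List Int) Int),
    muR h v < f → InvM memo →
    (goB f x y h v memo).1 = max_route x y h v ∧ InvM (goB f x y h v memo).2 := by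
  intro f
  induction f with
  | zero => intro x y h v memo hf; omega
  | succ f ih =>
    intro x y h v memo hf hI
    cases hg : memo.get? (x, y, h, v) with
    | some r =>
      rw [goB_some f x y h v memo r hg]
      exact ⟨hI _ _ hg, hI⟩
    | none =>
      rw [goB_none f x y h v memo hg, max_route_eq x y h v]
      simp only []
      split_ifs with c1 c2 c3
      · exact ⟨rfl, InvM_insert memo x y h v 0 hI
          (((max_route_eq x y h v).trans (if_pos c1)).symm)⟩
      · exact ⟨rfl, InvM_insert memo x y h v _ hI
          (((max_route_eq x y h v).trans ((if_neg c1).trans (if_pos c2))).symm)⟩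
      · -- recursive branch
        have hno : ¬((∃ e ∈ h, 3 ≤ e) ∨ (∃ e ∈ v, 3 ≤ e)) :=
          fun hx => c1 ((any_or_true_iff h v).mpr hx)
        have allh : ∀ e ∈ h, e < 3 := fun e he => by
          by_contra hc; exact hno (Or.inl ⟨e, he, by omega⟩)
        have allv : ∀ e ∈ v, e < 3 := fun e he => by
          by_contra hc; exact hno (Or.inr ⟨e, he, by omega⟩)
        have dh := mu_dec_h h v y allh c3.2.2.1 c3.2.2.2
        have dv := mu_dec_v h v x allv c3.1 c3.2.1
        obtain ⟨e1, i1⟩ := ih (x - 1) y (pyIncAt h y) v memo (by omega) hI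
        obtain ⟨e2, i2⟩ := ih (x + 1) y (pyIncAt h y) v
          (goB f (x - 1) y (pyIncAt h y) v memo).2 (by omega) i1
        obtain ⟨e3, i3⟩ := ih x (y - 1) h (pyIncAt v x)
          (goB f (x + 1) y (pyIncAt h y) v (goB f (x - 1) y (pyIncAt h y) v memo).2).2
          (by omega) i2
        obtain ⟨e4, i4⟩ := ih x (y + 1) h (pyIncAt v x)
          (goB f x (y - 1) h (pyIncAt v x)
            (goB f (x + 1) y (pyIncAt h y) v (goB f (x - 1) y (pyIncAt h y) v memo).2).2).2
          (by omega) i3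
        rw [e1, e2, e3, e4]
        refine ⟨rfl, InvM_insert _ x y h v _ i4 ?_⟩
        exact ((max_route_eq x y h v).trans
          ((if_neg c1).trans ((if_neg c2).trans (if_pos c3)))).symm
      · exact ⟨rfl, InvM_insert memo x y h v 0 hI
          (((max_route_eq x y h v).trans
            ((if_neg c1).trans ((if_neg c2).trans (if_neg c3)))).symm)⟩

-- ===== VERDICT (by name: the statement is the Claim_ definition above) =====
theorem max_route_spec : Claim_equal_max_route := by
  intro pos_x pos_y horizontal vertical _
  unfold Spec_max_route max_route_alt
  have hI : InvM PySem.Dict.empty := by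
    intro k r hk; rw [PySem.Dict.get?_empty] at hk; cases hk
  exact (goB_correct (muR horizontal vertical + 1) pos_x pos_y horizontal vertical
    PySem.Dict.empty (by omega) hI).1.symm
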